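-- pv_equiv track=rewrite | github.com/younglubz/Predictionarb | arbitrage_combinatorial.py | _are_complementary_outcomes
-- ===== SOURCE A (Python) =====
-- def _are_complementary_outcomes(outcome1: str, outcome2: str) -> bool:
--     """Verifica se dois outcomes são complementares (Yes/No)"""
--     o1 = outcome1.lower().strip()
--     o2 = outcome2.lower().strip()
--
--     complementary_sets = [
--         {"yes", "no"},
--         {"true", "false"},
--         {"will", "won't"},
--         {"republican", "democratic"},  # Dois partidos principais
--     ]
--
--     for comp_set in complementary_sets:
--         if o1 in comp_set and o2 in comp_set and o1 != o2:
--             return True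
--
--     return False
-- ===== SOURCE B (Python) =====
-- _COMPLEMENT = {
--     "yes": "no", "no": "yes",
--     "true": "false", "false": "true",
--     "will": "won't", "won't": "will",
--     "republican": "democratic", "democratic": "republican",
-- }
--
-- def _are_complementary_outcomes(outcome1: str, outcome2: str) -> bool:
--     return _COMPLEMENT.get(outcome1.lower().strip()) == outcome2.lower().strip()
-- ===== Notes on version B (the rewrite author's own statement) =====
-- stated objective: simpler
-- what changed: Replaces the loop over a list of two-element sets (membership + inequality tests) with one flat word-to-complement dict built once; the result is a single lookup compared to the other normalized word.
import Mathlib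
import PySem

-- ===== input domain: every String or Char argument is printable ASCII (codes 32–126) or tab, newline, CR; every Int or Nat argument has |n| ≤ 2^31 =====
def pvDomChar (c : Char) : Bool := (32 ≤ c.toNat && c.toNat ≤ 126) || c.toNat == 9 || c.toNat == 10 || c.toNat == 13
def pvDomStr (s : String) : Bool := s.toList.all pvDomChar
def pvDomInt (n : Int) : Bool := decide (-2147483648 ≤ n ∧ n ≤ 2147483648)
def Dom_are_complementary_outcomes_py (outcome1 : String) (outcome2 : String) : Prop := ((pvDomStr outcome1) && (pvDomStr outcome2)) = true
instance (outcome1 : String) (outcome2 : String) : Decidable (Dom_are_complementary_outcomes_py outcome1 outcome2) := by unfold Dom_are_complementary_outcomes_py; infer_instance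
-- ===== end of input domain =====

-- B replaces A's loop over two-element complementary sets by a single flat
-- word→complement dictionary lookup (objective: simpler).


-- ===== PORT A =====
-- the list of complementary sets, built as Python builds set literals
def pvCompSets : List (PySem.Set String) :=
  [ PySem.Set.ofList ["yes", "no"],
    PySem.Set.ofList ["true", "false"],
    PySem.Set.ofList ["will", "won't"],
    PySem.Set.ofList ["republican", "democratic"] ]

-- the 'for comp_set in complementary_sets' loop with its early return
def pvLoopA : List (PySem.Set String) → String → String → Bool
  | [], _, _ => false
  | s :: rest, o1, o2 =>
      if PySem.Set.contains s o1 && PySem.Set.contains s o2 && o1 != o2 then true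
      else pvLoopA rest o1 o2

def are_complementary_outcomes_py (outcome1 : String) (outcome2 : String) : Bool :=
  let o1 := PySem.Str.strip (PySem.Str.lower outcome1)
  let o2 := PySem.Str.strip (PySem.Str.lower outcome2)
  pvLoopA pvCompSets o1 o2

-- ===== PORT B =====
-- the module-level flat complement dict
def pvComplement : PySem.Dict String String :=
  PySem.Dict.ofList
    [ ("yes", "no"), ("no", "yes"),
      ("true", "false"), ("false", "true"),
      ("will", "won't"), ("won't", "will"),
      ("republican", "democratic"), ("democratic", "republican") ]

-- _COMPLEMENT.get(o1) == o2 : None == str is False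
def pvLookupB (o1 : String) (o2 : String) : Bool :=
  match PySem.Dict.get? pvComplement o1 with
  | some c => c == o2
  | none => false

def are_complementary_outcomes_py_alt (outcome1 : String) (outcome2 : String) : Bool :=
  pvLookupB (PySem.Str.strip (PySem.Str.lower outcome1)) (PySem.Str.strip (PySem.Str.lower outcome2))

-- ===== PRECONDITION & SPEC =====
def Spec_are_complementary_outcomes_py (outcome1 : String) (outcome2 : String) (out : Bool) : Prop := out = are_complementary_outcomes_py_alt outcome1 outcome2
instance (outcome1 : String) (outcome2 : String) (out : Bool) : Decidable (Spec_are_complementary_outcomes_py outcome1 outcome2 out) := by unfold Spec_are_complementary_outcomes_py; infer_instance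

-- ===== CLAIM (what is proved, stated in full; the proofs are below) =====
def Claim_equal_are_complementary_outcomes_py : Prop := ∀ (outcome1 : String) (outcome2 : String), Dom_are_complementary_outcomes_py outcome1 outcome2 → Spec_are_complementary_outcomes_py outcome1 outcome2 (are_complementary_outcomes_py outcome1 outcome2)

-- ===== LEMMAS AND PROOFS =====

theorem pvCase_yes (b : String) :
    pvLoopA pvCompSets "yes" b =
      pvLookupB "yes" b := by
  show pvLoopA pvCompSets "yes" b = ("no" == b)
  by_cases hb : b = "yes"
  · subst hb; decide
  · simp [pvLoopA, pvCompSets, PySem.Set.contains, PySem.Set.ofList, PySem.Set.add, hb, Ne.symm hb]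
    by_cases hc : b = "no"
    · subst hc; simp
    · simp [hc, Ne.symm hc]

theorem pvCase_no (b : String) :
    pvLoopA pvCompSets "no" b =
      pvLookupB "no" b := by
  show pvLoopA pvCompSets "no" b = ("yes" == b)
  by_cases hb : b = "no"
  · subst hb; decide
  · simp [pvLoopA, pvCompSets, PySem.Set.contains, PySem.Set.ofList, PySem.Set.add, hb, Ne.symm hb]
    by_cases hc : b = "yes"
    · subst hc; simp
    · simp [hc, Ne.symm hc]

theorem pvCase_true (b : String) :
    pvLoopA pvCompSets "true" b =
      pvLookupB "true" b := by
  show pvLoopA pvCompSets "true" b = ("false" == b)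
  by_cases hb : b = "true"
  · subst hb; decide
  · simp [pvLoopA, pvCompSets, PySem.Set.contains, PySem.Set.ofList, PySem.Set.add, hb, Ne.symm hb]
    by_cases hc : b = "false"
    · subst hc; simp
    · simp [hc, Ne.symm hc]

theorem pvCase_false (b : String) :
    pvLoopA pvCompSets "false" b =
      pvLookupB "false" b := by
  show pvLoopA pvCompSets "false" b = ("true" == b)
  by_cases hb : b = "false"
  · subst hb; decide
  · simp [pvLoopA, pvCompSets, PySem.Set.contains, PySem.Set.ofList, PySem.Set.add, hb, Ne.symm hb]
    by_cases hc : b = "true"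
    · subst hc; simp
    · simp [hc, Ne.symm hc]

theorem pvCase_will (b : String) :
    pvLoopA pvCompSets "will" b =
      pvLookupB "will" b := by
  show pvLoopA pvCompSets "will" b = ("won't" == b)
  by_cases hb : b = "will"
  · subst hb; decide
  · simp [pvLoopA, pvCompSets, PySem.Set.contains, PySem.Set.ofList, PySem.Set.add, hb, Ne.symm hb]
    by_cases hc : b = "won't"
    · subst hc; simp
    · simp [hc, Ne.symm hc]

theorem pvCase_won_t (b : String) :
    pvLoopA pvCompSets "won't" b =
      pvLookupB "won't" b := by
  show pvLoopA pvCompSets "won't" b = ("will" == b)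
  by_cases hb : b = "won't"
  · subst hb; decide
  · simp [pvLoopA, pvCompSets, PySem.Set.contains, PySem.Set.ofList, PySem.Set.add, hb, Ne.symm hb]
    by_cases hc : b = "will"
    · subst hc; simp
    · simp [hc, Ne.symm hc]

theorem pvCase_republican (b : String) :
    pvLoopA pvCompSets "republican" b =
      pvLookupB "republican" b := by
  show pvLoopA pvCompSets "republican" b = ("democratic" == b)
  by_cases hb : b = "republican"
  · subst hb; decide
  · simp [pvLoopA, pvCompSets, PySem.Set.contains, PySem.Set.ofList, PySem.Set.add, hb, Ne.symm hb]
    by_cases hc : b = "democratic"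
    · subst hc; simp
    · simp [hc, Ne.symm hc]

theorem pvCase_democratic (b : String) :
    pvLoopA pvCompSets "democratic" b =
      pvLookupB "democratic" b := by
  show pvLoopA pvCompSets "democratic" b = ("republican" == b)
  by_cases hb : b = "democratic"
  · subst hb; decide
  · simp [pvLoopA, pvCompSets, PySem.Set.contains, PySem.Set.ofList, PySem.Set.add, hb, Ne.symm hb]
    by_cases hc : b = "republican"
    · subst hc; simp
    · simp [hc, Ne.symm hc]

-- outside the table: the dict lookup misses
theorem pvGet_none (a : String) (h1 : ¬ a = "yes") (h2 : ¬ a = "no") (h3 : ¬ a = "true") (h4 : ¬ a = "false") (h5 : ¬ a = "will") (h6 : ¬ a = "won't") (h7 : ¬ a = "republican") (h8 : ¬ a = "democratic") :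
    PySem.Dict.get? pvComplement a = none := by
  simp [pvComplement, PySem.Dict.get?, PySem.Dict.ofList, PySem.Dict.empty, PySem.Dict.update,
    PySem.Dict.insert, List.find?,
    beq_eq_false_iff_ne.mpr (Ne.symm h1),
    beq_eq_false_iff_ne.mpr (Ne.symm h2),
    beq_eq_false_iff_ne.mpr (Ne.symm h3),
    beq_eq_false_iff_ne.mpr (Ne.symm h4),
    beq_eq_false_iff_ne.mpr (Ne.symm h5),
    beq_eq_false_iff_ne.mpr (Ne.symm h6),
    beq_eq_false_iff_ne.mpr (Ne.symm h7),
    beq_eq_false_iff_ne.mpr (Ne.symm h8)]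

-- outside the table: every set-membership test in the loop fails
theorem pvLoop_false (a b : String) (h1 : ¬ a = "yes") (h2 : ¬ a = "no") (h3 : ¬ a = "true") (h4 : ¬ a = "false") (h5 : ¬ a = "will") (h6 : ¬ a = "won't") (h7 : ¬ a = "republican") (h8 : ¬ a = "democratic") :
    pvLoopA pvCompSets a b = false := by
  simp [pvLoopA, pvCompSets, PySem.Set.contains, PySem.Set.ofList, PySem.Set.add, h1, h2, h3, h4, h5, h6, h7, h8]

-- core agreement after normalisation: the loop over pairs equals the dict lookup
theorem pvCore_eq (a b : String) :
    pvLoopA pvCompSets a b =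
      pvLookupB a b := by
  by_cases h1 : a = "yes"
  · subst h1; exact pvCase_yes b
  by_cases h2 : a = "no"
  · subst h2; exact pvCase_no b
  by_cases h3 : a = "true"
  · subst h3; exact pvCase_true b
  by_cases h4 : a = "false"
  · subst h4; exact pvCase_false b
  by_cases h5 : a = "will"
  · subst h5; exact pvCase_will b
  by_cases h6 : a = "won't"
  · subst h6; exact pvCase_won_t b
  by_cases h7 : a = "republican"
  · subst h7; exact pvCase_republican b
  by_cases h8 : a = "democratic"
  · subst h8; exact pvCase_democratic b
  unfold pvLookupB
  rw [pvGet_none a h1 h2 h3 h4 h5 h6 h7 h8]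
  exact pvLoop_false a b h1 h2 h3 h4 h5 h6 h7 h8

-- ===== VERDICT (by name: the statement is the Claim_ definition above) =====
theorem are_complementary_outcomes_py_spec : Claim_equal_are_complementary_outcomes_py := by
  intro o1 o2 _
  unfold Spec_are_complementary_outcomes_py are_complementary_outcomes_py are_complementary_outcomes_py_alt
  exact pvCore_eq _ _
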